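-- pv_equiv track=rewrite | github.com/csprock/keras-NER | batch_tools.py | indices_by_length
-- ===== SOURCE A (Python) =====
-- def indices_by_length(data):
--     '''
--     Groups sample indices by sentence length. Input is a list of dictionaries with key 'length'.
--     Returns dictionary keyed to sentence length containing a list of indices.
--     '''
--     length_batches = dict()
--     for i, d in data.items():
--         if d['length'] not in length_batches:
--             length_batches[d['length']] = [i]
--         else:
--             length_batches[d['length']].append(i)
--
--     return length_batches
-- ===== SOURCE B (Python) =====
-- def indices_by_length(data):
--     items = list(data.items())
--     seen = []
--     for i, d in items:
--         if d['length'] not in seen: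
--             seen.append(d['length'])
--     return {L: [i for i, d in items if d['length'] == L] for L in seen}
-- ===== Notes on version B (the rewrite author's own statement) =====
-- stated objective: alternative
-- what changed: Replaces the single-pass build-dict-as-you-go (membership test then insert-or-append into the result dict) with a two-phase decomposition: first collect the distinct lengths in first-appearance order, then build each group's index list by a comprehension over the items.
import Mathlib
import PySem

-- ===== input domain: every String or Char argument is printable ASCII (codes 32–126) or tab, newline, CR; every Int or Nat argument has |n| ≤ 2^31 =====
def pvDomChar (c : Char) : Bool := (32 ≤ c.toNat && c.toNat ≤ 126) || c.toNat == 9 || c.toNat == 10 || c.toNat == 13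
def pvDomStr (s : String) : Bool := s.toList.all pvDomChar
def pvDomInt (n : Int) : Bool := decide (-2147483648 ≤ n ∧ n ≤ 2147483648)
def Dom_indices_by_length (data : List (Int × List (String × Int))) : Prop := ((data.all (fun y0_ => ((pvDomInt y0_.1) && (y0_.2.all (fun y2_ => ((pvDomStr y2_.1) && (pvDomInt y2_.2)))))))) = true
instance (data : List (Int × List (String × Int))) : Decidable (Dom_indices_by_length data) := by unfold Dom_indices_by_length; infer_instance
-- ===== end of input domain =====

-- B is an alternative decomposition: first the distinct lengths in first-appearance
-- order, then one comprehension per length; same cost class, genuinely different structure.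

-- ===== PORT A =====
-- single pass: membership test, then insert-or-append into the result dict
def indices_by_length (data : List (Int × List (String × Int))) : List (Int × List Int) :=
  (data.foldl
    (fun (length_batches : PySem.Dict Int (List Int)) p =>
      let L : Int := (PySem.Dict.ofList p.2).getD "length" 0   -- d['length']; Pre_ guarantees the key exists
      if length_batches.contains L = false then
        length_batches.insert L [p.1]
      else
        length_batches.modify L [] (fun v => v ++ [p.1]))
    PySem.Dict.empty).items

-- ===== PORT B =====
-- phase 1: distinct lengths in first-appearance order; phase 2: one scan per length
def indices_by_length_alt (data : List (Int × List (String × Int))) : List (Int × List Int) :=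
  let seen : List Int := data.foldl
    (fun (seen : List Int) p =>
      if seen.contains ((PySem.Dict.ofList p.2).getD "length" 0) then seen
      else seen ++ [(PySem.Dict.ofList p.2).getD "length" 0]) []
  seen.map (fun L =>
    (L, (data.filter (fun p => (PySem.Dict.ofList p.2).getD "length" 0 == L)).map (fun p => p.1)))

-- ===== PRECONDITION & SPEC =====
-- Pre_: every row dict has the key 'length'; on a row without it Python A raises KeyError.
def Pre_indices_by_length (data : List (Int × List (String × Int))) : Prop :=
  ∀ p ∈ data, (PySem.Dict.ofList p.2).contains "length" = true
instance (data : List (Int × List (String × Int))) : Decidable (Pre_indices_by_length data) := by unfold Pre_indices_by_length; infer_instance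
def pvWitness_indices_by_length : (List (Int × List (String × Int))) := [(0, [("length", 2)]), (1, [("length", 2)]), (2, [("length", 1)])]

def Spec_indices_by_length (data : List (Int × List (String × Int))) (out : List (Int × List Int)) : Prop := out = indices_by_length_alt data
instance (data : List (Int × List (String × Int))) (out : List (Int × List Int)) : Decidable (Spec_indices_by_length data out) := by unfold Spec_indices_by_length; infer_instance

-- ===== CLAIM (what is proved, stated in full; the proofs are below) =====
def Claim_equal_indices_by_length : Prop := ∀ (data : List (Int × List (String × Int))), Dom_indices_by_length data → Pre_indices_by_length data → Spec_indices_by_length data (indices_by_length data)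

-- ===== LEMMAS AND PROOFS =====

-- the length of a row, as both ports compute it
def pvKey (p : Int × List (String × Int)) : Int := (PySem.Dict.ofList p.2).getD "length" 0

-- A's loop body is exactly Dict.modify at the row's key
theorem pvStepA (lb : PySem.Dict Int (List Int)) (p : Int × List (String × Int)) :
    (if lb.contains (pvKey p) = false then lb.insert (pvKey p) [p.1]
     else lb.modify (pvKey p) [] (fun v => v ++ [p.1]))
    = lb.modify (pvKey p) [] (fun v => v ++ [p.1]) := by
  by_cases h : lb.contains (pvKey p) = false
  · simp only [h, if_true]
    simp [PySem.Dict.modify, PySem.Dict.getD_of_not_contains lb ([] : List Int) h]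
  · simp [h]

-- B's seen-loop is PySem.Set.ofList of the keys
theorem pvSeenB (data : List (Int × List (String × Int))) :
    data.foldl (fun (seen : List Int) p =>
      if seen.contains (pvKey p) then seen else seen ++ [pvKey p]) []
    = PySem.Set.ofList (data.map pvKey) := by
  rw [← PySem.Set.update_nil_left, PySem.Set.update_map_eq_foldl_add]
  apply List.foldl_ext
  intro s p _
  simp [PySem.Set.add, PySem.Set.contains]

theorem indices_by_length_eq (data : List (Int × List (String × Int))) :
    indices_by_length data = indices_by_length_alt data := by
  unfold indices_by_length indices_by_length_alt
  have hA : (data.foldl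
      (fun (lb : PySem.Dict Int (List Int)) p =>
        if lb.contains (pvKey p) = false then lb.insert (pvKey p) [p.1]
        else lb.modify (pvKey p) [] (fun v => v ++ [p.1]))
      PySem.Dict.empty)
      = data.foldl (fun lb p => lb.modify (pvKey p) [] (fun v => v ++ [p.1])) PySem.Dict.empty := by
    apply List.foldl_ext
    intro lb p _
    exact pvStepA lb p
  show (data.foldl
      (fun (lb : PySem.Dict Int (List Int)) p =>
        if lb.contains (pvKey p) = false then lb.insert (pvKey p) [p.1]
        else lb.modify (pvKey p) [] (fun v => v ++ [p.1]))
      PySem.Dict.empty).items = _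
  rw [hA]
  show _ = List.map
      (fun L => (L, (data.filter (fun p => pvKey p == L)).map (fun p => p.1)))
      (data.foldl (fun (seen : List Int) p =>
        if seen.contains (pvKey p) then seen else seen ++ [pvKey p]) [])
  rw [pvSeenB]
  set d := data.foldl (fun (lb : PySem.Dict Int (List Int)) p => lb.modify (pvKey p) [] (fun v => v ++ [p.1])) PySem.Dict.empty with hd
  have hkeys : d.keys = PySem.Set.ofList (data.map pvKey) := by
    rw [hd]
    rw [PySem.Dict.keys_foldl_modify_key data pvKey [] (fun _ p v => v ++ [p.1]) PySem.Dict.empty]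
    simp [PySem.Dict.keys_empty, PySem.Set.update_nil_left]
  have hnd : d.keys.Nodup := by
    rw [hd]
    exact PySem.Dict.nodup_keys_foldl_modify_key data pvKey [] (fun _ p v => v ++ [p.1])
      PySem.Dict.empty (by simp [PySem.Dict.keys_empty])
  have hget : ∀ c : Int, d.getD c [] = (data.filter (fun p => pvKey p == c)).map (fun p => p.1) := by
    intro c
    have hmap : d = (data.map (fun p => (pvKey p, p.1))).foldl
        (fun (lb : PySem.Dict Int (List Int)) q => lb.modify q.1 [] (fun v => v ++ [q.2]))
        PySem.Dict.empty := by
      rw [hd, List.foldl_map]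
    rw [hmap, PySem.Dict.getD_foldl_modify_append]
    simp only [PySem.Dict.getD_empty, List.nil_append, List.filter_map, List.map_map]
    rfl
  rw [PySem.Dict.items_eq_map_keys d hnd [], hkeys]
  apply List.map_congr_left
  intro L _
  rw [hget L]

-- ===== VERDICT (by name: the statement is the Claim_ definition above) =====
theorem indices_by_length_spec : Claim_equal_indices_by_length := by
  intro data _ _
  exact indices_by_length_eq data
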